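-- pv_equiv track=rewrite | github.com/jjkamantauskas/Dungeonbot | charactercreator.py | assign_stats
-- ===== SOURCE A (Python) =====
-- CLASS_PRIORITIES = {
--     "monk": ["Dexterity", "Wisdom", "Constitution"],
--     "wizard": ["Intelligence", "Constitution", "Dexterity"],
--     "rogue": ["Dexterity", "Constitution", "Wisdom"],
-- }
--
-- def assign_stats(stats, class_key):
--     priorities = CLASS_PRIORITIES[class_key]
--     abilities = ["Strength", "Dexterity", "Constitution", "Intelligence", "Wisdom", "Charisma"]
--
--     stats = sorted(stats, reverse=True)
--
--     assignment = {}
--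
--     # Assign highest stats to priority abilities
--     for ability, score in zip(priorities, stats):
--             assignment[ability] = score
--
--     # Assign remaining stats arbitrarily (or later via UI)
--     remaining_scores = stats[len(priorities):]
--     remaining_abilities = [a for a in abilities if a not in assignment]
--
--     for ability, score in zip(remaining_abilities, remaining_scores):
--         assignment[ability] = score
--
--     return assignment
-- ===== SOURCE B (Python) =====
-- CLASS_PRIORITIES = {
--     "monk": ["Dexterity", "Wisdom", "Constitution"],
--     "wizard": ["Intelligence", "Constitution", "Dexterity"],
--     "rogue": ["Dexterity", "Constitution", "Wisdom"],
-- }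
--
-- def assign_stats(stats, class_key):
--     # Selection algorithm: no sorting at all.  Walk the abilities in assignment
--     # order (class priorities first, then the rest) and repeatedly extract the
--     # maximum from the remaining pool of rolls.
--     priorities = CLASS_PRIORITIES[class_key]
--     abilities = ["Strength", "Dexterity", "Constitution", "Intelligence", "Wisdom", "Charisma"]
--     assignment = {}
--     pool = list(stats)
--     for ability in priorities + [a for a in abilities if a not in priorities]:
--         if not pool:
--             break
--         best = max(pool)
--         pool.remove(best)
--         assignment[ability] = best
--     return assignment
-- ===== Notes on version B (the rewrite author's own statement) =====
-- stated objective: alternative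
-- what changed: B never sorts: it walks the abilities in class-priority order and repeatedly extracts the maximum from the remaining pool of rolls (selection), instead of A's sort-descending-then-two-zip-loops with a membership test against the growing dict.
import Mathlib
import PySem

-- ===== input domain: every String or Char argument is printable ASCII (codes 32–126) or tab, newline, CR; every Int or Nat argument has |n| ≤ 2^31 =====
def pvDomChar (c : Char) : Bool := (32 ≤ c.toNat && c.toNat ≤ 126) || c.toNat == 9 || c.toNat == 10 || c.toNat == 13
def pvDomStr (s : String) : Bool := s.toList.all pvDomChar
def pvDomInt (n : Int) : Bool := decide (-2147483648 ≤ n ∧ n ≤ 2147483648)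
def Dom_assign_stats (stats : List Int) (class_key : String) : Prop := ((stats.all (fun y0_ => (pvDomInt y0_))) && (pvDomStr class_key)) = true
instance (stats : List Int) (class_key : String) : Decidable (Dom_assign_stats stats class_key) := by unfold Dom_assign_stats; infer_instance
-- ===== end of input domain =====

-- B replaces A's sort-then-two-zip-loops by a selection loop: it walks the abilities in
-- class-priority order and repeatedly extracts the maximum from the remaining pool of rolls.
-- Objective: alternative (a genuinely different algorithm of similar cost).

-- ===== PORT A =====
def CLASS_PRIORITIES : PySem.Dict String (List String) := PySem.Dict.ofList
  [("monk", ["Dexterity", "Wisdom", "Constitution"]),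
   ("wizard", ["Intelligence", "Constitution", "Dexterity"]),
   ("rogue", ["Dexterity", "Constitution", "Wisdom"])]

def assign_stats (stats : List Int) (class_key : String) : List (String × Int) :=
  -- CLASS_PRIORITIES[class_key]: KeyError on a missing key; Pre_ excludes that, .getD [] is only a totaliser
  let priorities := (CLASS_PRIORITIES.get? class_key).getD []
  let abilities := ["Strength", "Dexterity", "Constitution", "Intelligence", "Wisdom", "Charisma"]
  let stats2 := PySem.List.sorted stats (fun x => x) true
  let assignment : PySem.Dict String Int :=
    (priorities.zip stats2).foldl (fun d p => d.insert p.1 p.2) PySem.Dict.empty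
  let remaining_scores := PySem.List.slice stats2 (some (priorities.length : Int)) none
  let remaining_abilities := abilities.filter (fun a => !(assignment.contains a))
  let assignment2 :=
    (remaining_abilities.zip remaining_scores).foldl (fun d p => d.insert p.1 p.2) assignment
  assignment2.items

-- ===== PORT B =====
-- the selection loop of Source B: for each ability, if the pool is empty break,
-- else pull the maximum out of the pool and assign it
def selectLoop (order : List String) (pool : List Int) (d : PySem.Dict String Int) :
    PySem.Dict String Int :=
  match order with
  | [] => d
  | a :: rest =>
    match PySem.List.max? pool (fun x => x) with
    | none => d              -- `if not pool: break`
    | some m =>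
      selectLoop rest ((PySem.List.remove? pool m).getD pool) (d.insert a m)

def assign_stats_alt (stats : List Int) (class_key : String) : List (String × Int) :=
  let priorities := (CLASS_PRIORITIES.get? class_key).getD []
  let abilities := ["Strength", "Dexterity", "Constitution", "Intelligence", "Wisdom", "Charisma"]
  let ordered := priorities ++ abilities.filter (fun a => !(priorities.contains a))
  (selectLoop ordered stats PySem.Dict.empty).items

-- ===== PRECONDITION & SPEC =====
-- Pre_ excludes exactly the class keys absent from CLASS_PRIORITIES, on which A raises KeyError.
def Pre_assign_stats (stats : List Int) (class_key : String) : Prop :=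
  class_key = "monk" ∨ class_key = "wizard" ∨ class_key = "rogue"
instance (stats : List Int) (class_key : String) : Decidable (Pre_assign_stats stats class_key) := by unfold Pre_assign_stats; infer_instance
def pvWitness_assign_stats : List Int × String := ([15, 8, 14, 10, 12, 13], "monk")

def Spec_assign_stats (stats : List Int) (class_key : String) (out : List (String × Int)) : Prop := out = assign_stats_alt stats class_key
instance (stats : List Int) (class_key : String) (out : List (String × Int)) : Decidable (Spec_assign_stats stats class_key out) := by unfold Spec_assign_stats; infer_instance

-- ===== CLAIM (what is proved, stated in full; the proofs are below) =====
def Claim_equal_assign_stats : Prop := ∀ (stats : List Int) (class_key : String), Dom_assign_stats stats class_key → Pre_assign_stats stats class_key → Spec_assign_stats stats class_key (assign_stats stats class_key)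

-- ===== LEMMAS AND PROOFS =====

-- Pulling the maximum off a list is pulling the head off its descending sort:
-- sorted(l, reverse=True) = max l :: sorted(l with first max removed, reverse=True).
theorem sortedDesc_cons (l : List Int) (m : Int)
    (h : PySem.List.max? l (fun x => x) = some m) :
    PySem.List.sorted l (fun x => x) true
      = m :: PySem.List.sorted (l.erase m) (fun x => x) true := by
  have hm : m ∈ l := PySem.List.max?_mem h
  have hmax : ∀ y ∈ l, y ≤ m := fun y hy => PySem.List.max?_isMax h y hy
  -- both sides are permutations of l and are ≥-sorted, hence equal
  have hp1 : (PySem.List.sorted l (fun x => x) true).Perm l := PySem.List.sorted_perm ..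
  have hp2 : (m :: PySem.List.sorted (l.erase m) (fun x => x) true).Perm l := by
    refine List.Perm.trans (List.Perm.cons m (PySem.List.sorted_perm ..)) ?_
    exact (List.perm_cons_erase hm).symm
  have hs1 : (PySem.List.sorted l (fun x => x) true).Pairwise (fun a b => b ≤ a) :=
    PySem.List.sorted_pairwise_rev ..
  have hs2 : (m :: PySem.List.sorted (l.erase m) (fun x => x) true).Pairwise
      (fun a b => b ≤ a) := by
    refine List.Pairwise.cons ?_ (PySem.List.sorted_pairwise_rev ..)
    intro y hy
    have : y ∈ l.erase m := (PySem.List.mem_sorted ..).1 hy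
    exact hmax y (List.mem_of_mem_erase this)
  exact List.Perm.eq_of_pairwise (fun a b _ _ h1 h2 => le_antisymm h2 h1) hs1 hs2
    (hp1.trans hp2.symm)

-- The selection loop computes the same dict as folding the zip of the order list
-- with the descending sort of the pool.
theorem selectLoop_eq (order : List String) (pool : List Int) (d : PySem.Dict String Int) :
    selectLoop order pool d
      = (order.zip (PySem.List.sorted pool (fun x => x) true)).foldl
          (fun d p => d.insert p.1 p.2) d := by
  induction order generalizing pool d with
  | nil => rfl
  | cons a rest ih =>
    rw [selectLoop]
    rcases hmx : PySem.List.max? pool (fun x => x) with _ | m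
    · have : pool = [] := (PySem.List.max?_eq_none_iff ..).1 hmx
      subst this
      simp [PySem.List.sorted]
    · have hm : m ∈ pool := PySem.List.max?_mem hmx
      show selectLoop rest ((PySem.List.remove? pool m).getD pool) (d.insert a m) = _
      rw [PySem.List.remove?_eq_some_erase pool m hm, sortedDesc_cons pool m hmx]
      simp only [List.zip_cons_cons, List.foldl_cons, Option.getD_some]
      exact ih (pool.erase m) (d.insert a m)

-- With the loop rewritten to the zip-fold, each of the three class keys is closed
-- by a case split on the shape of the sorted stats (only its first six entries matter).
theorem monk_core (ss : List Int) :
    assign_stats ss "monk" = assign_stats_alt ss "monk" := by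
  unfold assign_stats assign_stats_alt
  simp only [selectLoop_eq]
  generalize PySem.List.sorted ss (fun x => x) true = t
  match t with
  | [] => rfl
  | [a] => rfl
  | [a,b] => rfl
  | [a,b,c] => rfl
  | [a,b,c,d] => rfl
  | [a,b,c,d,e] => rfl
  | a::b::c::d::e::f::rest => rfl

theorem wizard_core (ss : List Int) :
    assign_stats ss "wizard" = assign_stats_alt ss "wizard" := by
  unfold assign_stats assign_stats_alt
  simp only [selectLoop_eq]
  generalize PySem.List.sorted ss (fun x => x) true = t
  match t with
  | [] => rfl
  | [a] => rfl
  | [a,b] => rfl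
  | [a,b,c] => rfl
  | [a,b,c,d] => rfl
  | [a,b,c,d,e] => rfl
  | a::b::c::d::e::f::rest => rfl

theorem rogue_core (ss : List Int) :
    assign_stats ss "rogue" = assign_stats_alt ss "rogue" := by
  unfold assign_stats assign_stats_alt
  simp only [selectLoop_eq]
  generalize PySem.List.sorted ss (fun x => x) true = t
  match t with
  | [] => rfl
  | [a] => rfl
  | [a,b] => rfl
  | [a,b,c] => rfl
  | [a,b,c,d] => rfl
  | [a,b,c,d,e] => rfl
  | a::b::c::d::e::f::rest => rfl

-- ===== VERDICT (by name: the statement is the Claim_ definition above) =====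
theorem assign_stats_spec : Claim_equal_assign_stats := by
  intro stats class_key _ hpre
  unfold Spec_assign_stats
  rcases hpre with h | h | h <;> subst h
  · exact (monk_core stats).symm ▸ rfl
  · exact (wizard_core stats).symm ▸ rfl
  · exact (rogue_core stats).symm ▸ rfl
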